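-- pv_equiv track=rewrite | github.com/cmcneece/advent_of_code | day_6/day_6.py | get_marker_index
-- ===== SOURCE A (Python) =====
-- def get_marker_index(data: str, marker_type='message') -> int:
--     ''' Takes the signal data and the type of marker we are looking for,
--     returns the index for where the maker type starts'''
--
--     match marker_type:
--         case 'message':
--             search_window = 14
--         case 'packet':
--             search_window = 4
--         case _:
--             Exception('Unknown marker type')
--
--     for i in range(len(data)):
--         marker = data[i:i + search_window]
--         # if there are any repeat characters in the window the test will fail
--         if len(set(marker)) == search_window:
--             return i + search_window
-- ===== SOURCE B (Python) =====
-- def get_marker_index(data: str, marker_type='message') -> int: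
--     # Sliding window: keep the longest duplicate-free suffix of the scanned
--     # prefix; the first time it reaches the search width, its end is the answer.
--     widths = {'message': 14, 'packet': 4}
--     if marker_type not in widths:
--         raise ValueError('Unknown marker type')
--     w = widths[marker_type]
--     window = []
--     for j, c in enumerate(data):
--         while c in window:
--             window.pop(0)
--         window.append(c)
--         if len(window) == w:
--             return j + 1
--     return None
-- ===== Notes on version B (the rewrite author's own statement) =====
-- stated objective: alternative
-- what changed: Replaces A's per-position slice-and-build-a-set scan with a single left-to-right sliding window that maintains the longest duplicate-free suffix (popping from the front on a repeat) and returns as soon as it reaches the search width.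
-- outside the precondition, e.g. on get_marker_index('', 'signal'): A returns None, B raises ValueError
import Mathlib
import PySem

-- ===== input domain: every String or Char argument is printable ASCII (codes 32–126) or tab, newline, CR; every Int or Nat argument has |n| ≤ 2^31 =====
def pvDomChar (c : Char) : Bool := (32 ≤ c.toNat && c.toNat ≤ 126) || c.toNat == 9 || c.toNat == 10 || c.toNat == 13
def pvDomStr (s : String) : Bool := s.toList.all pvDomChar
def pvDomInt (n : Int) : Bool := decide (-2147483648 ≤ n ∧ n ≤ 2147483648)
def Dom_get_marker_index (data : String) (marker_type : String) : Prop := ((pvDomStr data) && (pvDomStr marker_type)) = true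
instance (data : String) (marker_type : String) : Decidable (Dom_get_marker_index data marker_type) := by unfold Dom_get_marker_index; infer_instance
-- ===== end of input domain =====

-- B replaces A's per-index set-building scan by a single left-to-right sliding window
-- (the longest duplicate-free suffix of the scanned prefix); equivalence of RETURN VALUES
-- is proved on Pre_ (A raises UnboundLocalError outside it).

-- ===== PORT A =====
-- for i in range(len(data)): marker = data[i:i+search_window]; if len(set(marker)) == search_window: return i + search_window
-- 'rest' is invariantly data[i:], so data[i:i+w] = rest.take w (PySem.List.slice_natCast_add).
def pvGoA (w : Nat) (i : Nat) : List Char → Option Int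
  | [] => none
  | x :: rs =>
    let marker := List.take w (x :: rs)
    if (PySem.Set.ofList marker).length = w then some ((i : Int) + (w : Int))
    else pvGoA w (i + 1) rs

def get_marker_index (data : String) (marker_type : String) : Option Int :=
  -- match: 'message' → 14, 'packet' → 4; case _ builds Exception(...) but never raises it, so
  -- search_window stays unbound and Python raises UnboundLocalError in the loop — Pre_ excludes
  -- that (non-empty data with unknown marker_type); 0 is a dummy value never reached under Pre_.
  let search_window : Nat :=
    if marker_type = "message" then 14
    else if marker_type = "packet" then 4
    else 0
  pvGoA search_window 0 data.toList

-- ===== PORT B =====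
-- while c in window: window.pop(0)
def pvPopWhile (c : Char) : List Char → List Char
  | [] => []
  | x :: xs => if c ∈ (x :: xs) then pvPopWhile c xs else x :: xs

-- for j, c in enumerate(data): while c in window: window.pop(0); window.append(c); if len(window) == w: return j + 1
def pvGoB (w : Nat) (window : List Char) (j : Nat) : List Char → Option Int
  | [] => none
  | c :: rs =>
    let window' := pvPopWhile c window ++ [c]
    if window'.length = w then some ((j : Int) + 1)
    else pvGoB w window' (j + 1) rs

def get_marker_index_alt (data : String) (marker_type : String) : Option Int :=
  -- widths = {'message': 14, 'packet': 4}; raise ValueError on unknown marker_type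
  -- (the raise is outside Pre_; 'none' stands in for it here), w = widths[marker_type]
  match PySem.Dict.get? (PySem.Dict.ofList [("message", (14 : Nat)), ("packet", 4)]) marker_type with
  | none => none
  | some w => pvGoB w [] 0 data.toList

-- ===== PRECONDITION & SPEC =====
-- Pre_ excludes the unknown-marker_type inputs: there A raises UnboundLocalError on
-- non-empty data (its match `_` arm builds but never raises the Exception), and its None
-- on empty data is the same accident of the unraised arm — B raises ValueError instead.
def Pre_get_marker_index (data : String) (marker_type : String) : Prop :=
  marker_type = "message" ∨ marker_type = "packet"
instance (data : String) (marker_type : String) : Decidable (Pre_get_marker_index data marker_type) := by unfold Pre_get_marker_index; infer_instance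

def pvWitness_get_marker_index : String × String := ("abcdefgh", "packet")

def Spec_get_marker_index (data : String) (marker_type : String) (out : Option Int) : Prop := out = get_marker_index_alt data marker_type
instance (data : String) (marker_type : String) (out : Option Int) : Decidable (Spec_get_marker_index data marker_type out) := by unfold Spec_get_marker_index; infer_instance

-- ===== CLAIM (what is proved, stated in full; the proofs are below) =====
def Claim_equal_get_marker_index : Prop := ∀ (data : String) (marker_type : String), Dom_get_marker_index data marker_type → Pre_get_marker_index data marker_type → Spec_get_marker_index data marker_type (get_marker_index data marker_type)


-- ===== LEMMAS AND PROOFS =====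

-- 'hit at k': the window of width w starting at position k exists and is duplicate-free.
def pvHit (w : Nat) (l : List Char) (k : Nat) : Prop :=
  ((l.drop k).take w).length = w ∧ ((l.drop k).take w).Nodup

lemma pv_ofList_len_iff (m : List Char) : (PySem.Set.ofList m).length = m.length ↔ m.Nodup := by
  constructor
  · intro h
    have hp : (PySem.Set.ofList m).Perm m.dedup := by
      refine (List.perm_ext_iff_of_nodup (PySem.Set.nodup_ofList m) (List.nodup_dedup m)).mpr ?_
      intro a; simp [PySem.Set.mem_ofList, List.mem_dedup]
    have hlen := hp.length_eq
    have hd : m.dedup.length = m.length := by omega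
    have : m.dedup = m := (List.dedup_sublist m).eq_of_length hd
    rw [← this]; exact List.nodup_dedup m
  · intro h; rw [PySem.Set.ofList_eq_self_of_nodup m h]

lemma pv_condA_iff (w : Nat) (m : List Char) (hle : m.length ≤ w) :
    (PySem.Set.ofList m).length = w ↔ (m.length = w ∧ m.Nodup) := by
  constructor
  · intro h
    have h1 := PySem.Set.length_ofList_le (xs := m)
    have hm : m.length = w := by omega
    have : (PySem.Set.ofList m).length = m.length := by omega
    exact ⟨hm, (pv_ofList_len_iff m).mp this⟩
  · rintro ⟨h1, h2⟩
    rw [PySem.Set.ofList_eq_self_of_nodup m h2]; exact h1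

lemma pvHit_cons (w : Nat) (x : Char) (rs : List Char) (k : Nat) :
    pvHit w (x :: rs) (k + 1) ↔ pvHit w rs k := by
  simp [pvHit]

lemma pvGoA_none (w : Nat) (rest : List Char) (h : ∀ k, ¬ pvHit w rest k) :
    ∀ i, pvGoA w i rest = none := by
  induction rest with
  | nil => intro i; rfl
  | cons x rs ih =>
    intro i
    simp only [pvGoA]
    rw [if_neg, ih]
    · intro k
      have := h (k + 1)
      rwa [pvHit_cons] at this
    · intro hc
      have h0 := h 0
      rw [pv_condA_iff w _ (by simp)] at hc
      exact h0 (by simpa [pvHit] using hc)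

lemma pvGoA_some (w : Nat) (hw : 0 < w) :
    ∀ (rest : List Char) (k₀ : Nat), pvHit w rest k₀ →
    (∀ k < k₀, ¬ pvHit w rest k) →
    ∀ i, pvGoA w i rest = some (((i + k₀ + w : Nat) : Int)) := by
  intro rest
  induction rest with
  | nil =>
    intro k₀ hk _ i
    exfalso
    rcases hk with ⟨h1, _⟩
    simp at h1
    omega
  | cons x rs ih =>
    intro k₀ hk hmin i
    simp only [pvGoA]
    match k₀ with
    | 0 =>
      rw [if_pos]
      · congr 1
      · rw [pv_condA_iff w _ (by simp)]
        simpa [pvHit] using hk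
    | k₀' + 1 =>
      rw [if_neg, ih k₀' (by rwa [pvHit_cons] at hk)
        (fun k hkk => by rw [← pvHit_cons]; exact hmin (k+1) (by omega)) (i+1)]
      · congr 1
        push_cast; ring
      · intro hc
        rw [pv_condA_iff w _ (by simp)] at hc
        exact hmin 0 (by omega) (by simpa [pvHit] using hc)

lemma pvPopWhile_suffix (c : Char) (xs : List Char) : pvPopWhile c xs <:+ xs := by
  induction xs with
  | nil => simp [pvPopWhile]
  | cons x xs ih =>
    simp only [pvPopWhile]
    split
    · exact ih.trans (List.suffix_cons x xs)
    · exact List.suffix_rfl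

lemma pvPopWhile_not_mem (c : Char) (xs : List Char) : c ∉ pvPopWhile c xs := by
  induction xs with
  | nil => simp [pvPopWhile]
  | cons x xs ih =>
    simp only [pvPopWhile]
    split
    · exact ih
    · assumption

lemma pv_suffix_popWhile (c : Char) (xs : List Char) : ∀ s, s <:+ xs → c ∉ s →
    s <:+ pvPopWhile c xs := by
  induction xs with
  | nil => intro s hs _; simpa [pvPopWhile] using hs
  | cons x xs ih =>
    intro s hs hc
    simp only [pvPopWhile]
    split
    · rename_i hmem
      rcases List.suffix_cons_iff.mp hs with h | h
      · subst h; exact absurd hmem hc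
      · exact ih s h hc
    · exact hs

lemma pv_suffix_append_singleton (s p : List Char) (x : Char) (h : s <:+ p ++ [x]) :
    s = [] ∨ ∃ s', s = s' ++ [x] ∧ s' <:+ p := by
  rcases s.eq_nil_or_concat with rfl | ⟨s', y, rfl⟩
  · exact Or.inl rfl
  · right
    simp only [List.concat_eq_append] at h ⊢
    rcases h with ⟨q, hq⟩
    have hy : y = x := by
      have := congrArg (·.getLast?) hq
      simpa using this
    subst hy
    rw [← List.append_assoc] at hq
    have hq' : q ++ s' = p := by
      have := List.append_cancel_right hq
      exact this
    exact ⟨s', rfl, ⟨q, hq'⟩⟩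

lemma pv_seg_eq (l pre' win : List Char) (rs : List Char) (hl : l = pre' ++ rs)
    (hsuf : win <:+ pre') (k : Nat) (hk : k + win.length = pre'.length) :
    (l.drop k).take win.length = win := by
  rcases hsuf with ⟨q, hq⟩
  have hql : q.length = k := by
    have := congrArg List.length hq
    simp at this; omega
  subst hl
  rw [← hq, List.append_assoc, List.drop_append_of_le_length (by omega)]
  have hqe : List.drop k q = [] := List.drop_eq_nil_of_le (by omega)
  rw [hqe, List.nil_append, List.take_left]

lemma pv_main (w : Nat) (hw : 0 < w) :
    ∀ (rest pre window : List Char),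
      window.Nodup → window <:+ pre →
      (∀ s, s <:+ pre → s.Nodup → s <:+ window) →
      window.length < w →
      (∀ k, k + w ≤ pre.length → ¬ pvHit w (pre ++ rest) k) →
      pvGoB w window pre.length rest = pvGoA w 0 (pre ++ rest) := by
  intro rest
  induction rest with
  | nil =>
    intro pre window _ _ hmax _ hne
    rw [pvGoB, List.append_nil]
    refine (pvGoA_none w pre ?_ 0).symm
    intro k hk
    by_cases hkl : k + w ≤ pre.length
    · exact hne k hkl (by simpa using hk)
    · rcases hk with ⟨h1, _⟩
      rw [List.length_take, List.length_drop] at h1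
      omega
  | cons c rs ih =>
    intro pre window hnd hsuf hmax hlen hne
    simp only [pvGoB]
    set window' := pvPopWhile c window ++ [c] with hw'
    have hpw_suf := pvPopWhile_suffix c window
    have hnd' : window'.Nodup := by
      rw [hw', List.nodup_append]
      refine ⟨hnd.sublist hpw_suf.sublist, List.nodup_singleton c, ?_⟩
      intro a ha b hb heq
      rw [List.mem_singleton] at hb
      exact pvPopWhile_not_mem c window ((heq.trans hb) ▸ ha)
    have hsuf' : window' <:+ pre ++ [c] := by
      rcases (hpw_suf.trans hsuf) with ⟨q, hq⟩
      exact ⟨q, by rw [hw', ← List.append_assoc, hq]⟩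
    have hmax' : ∀ s, s <:+ pre ++ [c] → s.Nodup → s <:+ window' := by
      intro s hs hsnd
      rcases pv_suffix_append_singleton s pre c hs with rfl | ⟨s', rfl, hs'⟩
      · exact List.nil_suffix
      · have hnds' : s'.Nodup := (List.nodup_append.mp hsnd).1
        have hcs' : c ∉ s' := by
          have hdis := (List.nodup_append.mp hsnd).2.2
          exact fun hc => hdis c hc c (by simp) rfl
        have h1 : s' <:+ window := hmax s' hs' hnds'
        have h2 : s' <:+ pvPopWhile c window := pv_suffix_popWhile c window s' h1 hcs'
        rcases h2 with ⟨q, hq⟩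
        exact ⟨q, by rw [hw', ← List.append_assoc, hq]⟩
    have hlen' : window'.length ≤ w := by
      have : (pvPopWhile c window).length ≤ window.length := hpw_suf.length_le
      simp only [hw', List.length_append, List.length_singleton]
      omega
    have hassoc : pre ++ c :: rs = (pre ++ [c]) ++ rs := by simp
    by_cases hhit : window'.length = w
    · rw [if_pos hhit]
      have hseg : ((pre ++ c :: rs).drop (pre.length + 1 - w)).take w = window' := by
        have := pv_seg_eq (pre ++ c :: rs) (pre ++ [c]) window' rs hassoc hsuf'
          (pre.length + 1 - w) (by
            have : w ≤ pre.length + 1 := by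
              have := hsuf'.length_le; simp at this; omega
            simp [hhit]; omega)
        rwa [hhit] at this
      have hhit0 : pvHit w (pre ++ c :: rs) (pre.length + 1 - w) := by
        constructor
        · rw [hseg]; exact hhit
        · rw [hseg]; exact hnd'
      have hmin : ∀ k < pre.length + 1 - w, ¬ pvHit w (pre ++ c :: rs) k := by
        intro k hk
        exact hne k (by omega)
      rw [pvGoA_some w hw (pre ++ c :: rs) (pre.length + 1 - w) hhit0 hmin 0]
      congr 1
      have hwle : w ≤ pre.length + 1 := by
        have := hsuf'.length_le; simp at this; omega
      push_cast
      omega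
    · rw [if_neg hhit]
      have hne' : ∀ k, k + w ≤ (pre ++ [c]).length → ¬ pvHit w ((pre ++ [c]) ++ rs) k := by
        intro k hk
        rw [← hassoc]
        simp only [List.length_append, List.length_singleton] at hk
        by_cases hkl : k + w ≤ pre.length
        · exact hne k hkl
        · -- k + w = pre.length + 1 : the segment is the length-w suffix of pre ++ [c]
          have hkw : k + w = pre.length + 1 := by omega
          intro hhitk
          rcases hhitk with ⟨h1, h2⟩
          have hseg' : ((pre ++ c :: rs).drop k).take w <:+ pre ++ [c] := by
            have hdt : ((pre ++ c :: rs).drop k).take w =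
                (pre ++ [c]).drop k := by
              rw [hassoc, List.drop_append_of_le_length (by simp; omega)]
              have hlen2 : ((pre ++ [c]).drop k).length = w := by simp; omega
              rw [List.take_append_of_le_length (by omega)]
              rw [List.take_of_length_le (by omega)]
            rw [hdt]
            exact List.drop_suffix k _
          have := hmax' _ hseg' h2
          have hle := this.length_le
          rw [h1] at hle
          omega
      have := ih (pre ++ [c]) window' hnd' hsuf' hmax'
        (by omega) hne'
      rw [← hassoc] at this
      simpa using this

lemma pv_top (w : Nat) (hw : 0 < w) (l : List Char) :
    pvGoA w 0 l = pvGoB w [] 0 l := by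
  have h := pv_main w hw l [] []
    List.nodup_nil List.nil_suffix
    (fun s hs _ => by rw [List.suffix_nil.mp hs])
    hw (fun k hk => by simp at hk; omega)
  simpa using h.symm

-- ===== VERDICT (by name: the statement is the Claim_ definition above) =====
theorem get_marker_index_spec : Claim_equal_get_marker_index := by
  intro data marker_type _ hpre
  unfold Spec_get_marker_index
  rcases hpre with h | h
  · subst h
    have ha : get_marker_index data "message" = pvGoA 14 0 data.toList := by
      simp [get_marker_index]
    have hb : get_marker_index_alt data "message" = pvGoB 14 [] 0 data.toList := by
      have hg : (PySem.Dict.ofList [("message", (14 : Nat)), ("packet", 4)]).get? "message"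
          = some 14 := by decide
      simp [get_marker_index_alt, hg]
    rw [ha, hb]
    exact pv_top 14 (by norm_num) data.toList
  · subst h
    have ha : get_marker_index data "packet" = pvGoA 4 0 data.toList := by
      simp [get_marker_index]
    have hb : get_marker_index_alt data "packet" = pvGoB 4 [] 0 data.toList := by
      have hg : (PySem.Dict.ofList [("message", (14 : Nat)), ("packet", 4)]).get? "packet"
          = some 4 := by decide
      simp [get_marker_index_alt, hg]
    rw [ha, hb]
    exact pv_top 4 (by norm_num) data.toList
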